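-- pv_equiv track=rewrite | github.com/pypi-data/pypi-mirror-401 | packages/devcovenant/devcovenant-0.2.5-py3-none-any.whl/devcovenant/core/policy_scripts/dependency_license_sync.py | _extract_license_report
-- ===== SOURCE A (Python) =====
-- from typing import List
--
-- def _extract_license_report(text: str, heading: str) -> str:
--     """Extract the text inside the License Report section."""
--     lines = text.splitlines()
--     start = None
--     for index, line in enumerate(lines):
--         if line.strip().lower() == heading.lower():
--             start = index
--             break
--
--     if start is None:
--         return ""
--
--     # Collect lines until the next section header
--     section_lines: List[str] = [lines[start]]
--     remaining = iter(lines)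
--     for _ in range(start + 1):
--         next(remaining, None)
--     for line in remaining:
--         stripped = line.strip()
--         header_prefix = stripped.startswith("## ")
--         header_not_report = not stripped.lower().startswith(heading.lower())
--         if header_prefix and header_not_report:
--             break
--         section_lines.append(line)
--
--     return "\n".join(section_lines)
-- ===== SOURCE B (Python) =====
-- def _extract_license_report(text: str, heading: str) -> str:
--     """Extract the text inside the License Report section."""
--     target = heading.lower()
--
--     def _is_boundary(line: str) -> bool:
--         stripped = line.strip()
--         return stripped.startswith("## ") and not stripped.lower().startswith(target)
--
--     # Partition the lines into blocks: every boundary header starts a new block.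
--     blocks = []
--     current = []
--     for line in text.splitlines():
--         if _is_boundary(line):
--             blocks.append(current)
--             current = [line]
--         else:
--             current.append(line)
--     blocks.append(current)
--
--     # The section is the tail of the first block containing the heading line.
--     for block in blocks:
--         tail = _tail_from_heading(block, target)
--         if tail is not None:
--             return "\n".join(tail)
--     return ""
--
--
-- def _tail_from_heading(block, target):
--     while block:
--         if block[0].strip().lower() == target:
--             return block
--         block = block[1:]
--     return None
-- ===== Notes on version B (the rewrite author's own statement) =====
-- stated objective: alternative
-- what changed: B first partitions the lines into header-delimited blocks (each boundary '## ' header starts a new block), then returns the joined tail of the first block that contains the heading line, instead of A's find-start-index-then-collect-until-break scan.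
import Mathlib
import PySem

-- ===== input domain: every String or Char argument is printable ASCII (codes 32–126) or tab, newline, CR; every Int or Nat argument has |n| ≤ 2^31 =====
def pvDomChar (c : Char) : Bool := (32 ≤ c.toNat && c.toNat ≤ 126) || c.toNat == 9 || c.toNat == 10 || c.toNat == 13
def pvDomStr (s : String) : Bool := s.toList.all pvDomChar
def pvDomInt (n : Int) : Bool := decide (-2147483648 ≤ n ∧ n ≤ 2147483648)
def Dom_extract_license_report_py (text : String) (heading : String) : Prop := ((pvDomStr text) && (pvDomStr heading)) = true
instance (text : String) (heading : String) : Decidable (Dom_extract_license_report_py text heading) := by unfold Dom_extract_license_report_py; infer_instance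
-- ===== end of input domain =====

-- B re-implements A with a different algorithm: it first partitions the lines into
-- header-delimited blocks, then returns the tail of the first block containing the heading;
-- same return value everywhere (objective: alternative, same asymptotic cost).

-- ===== PORT A =====
-- 'for index, line in enumerate(lines): if line.strip().lower() == heading.lower(): start = index; break'
def pvFindStartA (target : String) : List String → Int → Option Int
  | [], _ => none
  | l :: rest, i =>
    if PySem.Str.lower (PySem.Str.strip l) = target then some i
    else pvFindStartA target rest (i + 1)

-- 'for line in remaining: …; if header_prefix and header_not_report: break; section_lines.append(line)'
def pvCollectA (target : String) : List String → List String → List String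
  | [], acc => acc
  | l :: rest, acc =>
    let stripped := PySem.Str.strip l
    let header_prefix := PySem.Str.startswith stripped "## "
    let header_not_report := !(PySem.Str.startswith (PySem.Str.lower stripped) target)
    if header_prefix && header_not_report then acc
    else pvCollectA target rest (acc ++ [l])

def extract_license_report_py (text : String) (heading : String) : String :=
  let lines := PySem.Str.splitlines text
  match pvFindStartA (PySem.Str.lower heading) lines 0 with
  | none => ""
  | some start =>
    -- section_lines = [lines[start]]; start is a valid index, so the default is never used
    let section0 := [PySem.List.pyGetD lines start ""]
    -- 'remaining = iter(lines)' advanced start+1 times = lines.drop (start+1); start ≥ 0 by construction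
    let remaining := lines.drop (start + 1).toNat
    PySem.Str.join "\n" (pvCollectA (PySem.Str.lower heading) remaining section0)

-- ===== PORT B =====
-- '_is_boundary(line)'
def pvIsBoundaryB (target : String) (line : String) : Bool :=
  PySem.Str.startswith (PySem.Str.strip line) "## " &&
  !(PySem.Str.startswith (PySem.Str.lower (PySem.Str.strip line)) target)

-- '_tail_from_heading(block, target)': the while loop popping the head
def pvTailFromHeadingB (target : String) : List String → Option (List String)
  | [] => none
  | l :: rest =>
    if PySem.Str.lower (PySem.Str.strip l) = target then some (l :: rest)
    else pvTailFromHeadingB target rest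

-- 'for block in blocks: tail = _tail_from_heading(...); if tail is not None: return ...'
def pvSearchBlocksB (target : String) : List (List String) → String
  | [] => ""
  | b :: bs =>
    match pvTailFromHeadingB target b with
    | some tail => PySem.Str.join "\n" tail
    | none => pvSearchBlocksB target bs

def extract_license_report_py_alt (text : String) (heading : String) : String :=
  let target := PySem.Str.lower heading
  -- the partition loop: state (blocks, current)
  let st := (PySem.Str.splitlines text).foldl
    (fun (st : List (List String) × List String) line =>
      if pvIsBoundaryB target line then (st.1 ++ [st.2], [line]) else (st.1, st.2 ++ [line]))
    ([], [])
  pvSearchBlocksB target (st.1 ++ [st.2])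

-- ===== PRECONDITION & SPEC =====
def Spec_extract_license_report_py (text : String) (heading : String) (out : String) : Prop := out = extract_license_report_py_alt text heading
instance (text : String) (heading : String) (out : String) : Decidable (Spec_extract_license_report_py text heading out) := by unfold Spec_extract_license_report_py; infer_instance

-- ===== CLAIM (what is proved, stated in full; the proofs are below) =====
def Claim_equal_extract_license_report_py : Prop := ∀ (text : String) (heading : String), Dom_extract_license_report_py text heading → Spec_extract_license_report_py text heading (extract_license_report_py text heading)

-- ===== LEMMAS AND PROOFS =====

-- proof-side recursive form of B's partition loop
def pvMkBlocks (target : String) : List String → List String → List (List String)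
  | [], cur => [cur]
  | l :: rest, cur =>
    if pvIsBoundaryB target l then cur :: pvMkBlocks target rest [l]
    else pvMkBlocks target rest (cur ++ [l])

-- proof-side linear-scan form both sides reduce to
def pvGo (target : String) : List String → String
  | [] => ""
  | l :: rest =>
    if PySem.Str.lower (PySem.Str.strip l) = target then
      PySem.Str.join "\n" (l :: rest.takeWhile (fun x => !pvIsBoundaryB target x))
    else pvGo target rest

theorem pvFoldl_eq_mkBlocks (target : String) (ls : List String) (blocks : List (List String)) (cur : List String) :
    (let st := ls.foldl (fun (st : List (List String) × List String) line =>
        if pvIsBoundaryB target line then (st.1 ++ [st.2], [line]) else (st.1, st.2 ++ [line]))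
      (blocks, cur);
     st.1 ++ [st.2]) = blocks ++ pvMkBlocks target ls cur := by
  induction ls generalizing blocks cur with
  | nil => simp [pvMkBlocks]
  | cons l rest ih =>
    simp only [List.foldl_cons, pvMkBlocks]
    by_cases h : pvIsBoundaryB target l = true
    · simp only [h]
      rw [ih]
      simp
    · simp only [h]
      rw [if_neg (by simp), if_neg (by simp)]
      exact ih blocks (cur ++ [l])

theorem pvCollectA_eq_takeWhile (target : String) (xs acc : List String) :
    pvCollectA target xs acc = acc ++ xs.takeWhile (fun l => !pvIsBoundaryB target l) := by
  induction xs generalizing acc with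
  | nil => simp [pvCollectA]
  | cons l rest ih =>
    simp only [pvCollectA, pvIsBoundaryB]
    rw [List.takeWhile_cons]
    cases h : (PySem.Str.startswith (PySem.Str.strip l) "## " &&
        !(PySem.Str.startswith (PySem.Str.lower (PySem.Str.strip l)) target)) <;>
      simp [pvIsBoundaryB, ih]

theorem pvMatch_not_boundary (target l : String)
    (h : PySem.Str.lower (PySem.Str.strip l) = target) : pvIsBoundaryB target l = false := by
  have hself : PySem.Chars.startswith target.toList target.toList = true :=
    (PySem.Chars.startswith_iff _ _).mpr (List.prefix_refl _)
  simp [pvIsBoundaryB, h, hself]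

theorem pvTail_append (target : String) (cur : List String) (x : String) (s : List String)
    (h : pvTailFromHeadingB target cur = some s) :
    pvTailFromHeadingB target (cur ++ [x]) = some (s ++ [x]) := by
  induction cur generalizing s with
  | nil => simp [pvTailFromHeadingB] at h
  | cons l rest ih =>
    rw [List.cons_append]
    simp only [pvTailFromHeadingB] at h ⊢
    by_cases hm : PySem.Str.lower (PySem.Str.strip l) = target
    · rw [if_pos hm] at h
      cases h
      rw [if_pos hm, List.cons_append]
    · rw [if_neg hm] at h
      rw [if_neg hm]
      exact ih s h

theorem pvTail_append_none (target : String) (cur : List String) (x : String)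
    (h : pvTailFromHeadingB target cur = none) :
    pvTailFromHeadingB target (cur ++ [x]) =
      (if PySem.Str.lower (PySem.Str.strip x) = target then some [x] else none) := by
  induction cur with
  | nil => simp [pvTailFromHeadingB]
  | cons l rest ih =>
    rw [List.cons_append]
    simp only [pvTailFromHeadingB] at h ⊢
    by_cases hm : PySem.Str.lower (PySem.Str.strip l) = target
    · rw [if_pos hm] at h; exact absurd h (by simp)
    · rw [if_neg hm] at h
      rw [if_neg hm]
      exact ih h

-- when the current block already holds the heading, scanning the remaining lines just
-- extends the tail until the next boundary
theorem pvSearch_found (target : String) (ls : List String) :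
    ∀ cur s, pvTailFromHeadingB target cur = some s →
    pvSearchBlocksB target (pvMkBlocks target ls cur) =
      PySem.Str.join "\n" (s ++ ls.takeWhile (fun x => !pvIsBoundaryB target x)) := by
  induction ls with
  | nil => intro cur s hs; simp [pvMkBlocks, pvSearchBlocksB, hs]
  | cons l rest ih =>
    intro cur s hs
    simp only [pvMkBlocks]
    by_cases hb : pvIsBoundaryB target l = true
    · simp [hb, pvSearchBlocksB, hs]
    · rw [if_neg (by simp [hb])]
      rw [ih (cur ++ [l]) (s ++ [l]) (pvTail_append target cur l s hs)]
      simp [hb]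

-- when the current block has no heading yet, B's block search equals the linear scan pvGo
theorem pvSearch_none (target : String) (ls : List String) :
    ∀ cur, pvTailFromHeadingB target cur = none →
    pvSearchBlocksB target (pvMkBlocks target ls cur) = pvGo target ls := by
  induction ls with
  | nil => intro cur hc; simp [pvMkBlocks, pvSearchBlocksB, hc, pvGo]
  | cons l rest ih =>
    intro cur hc
    simp only [pvMkBlocks, pvGo]
    by_cases hb : pvIsBoundaryB target l = true
    · have hnm : ¬ PySem.Str.lower (PySem.Str.strip l) = target := by
        intro hm; rw [pvMatch_not_boundary target l hm] at hb; simp at hb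
      rw [if_pos hb, if_neg hnm]
      simp only [pvSearchBlocksB, hc]
      exact ih [l] (by simp [pvTailFromHeadingB, hnm])
    · rw [if_neg (by simp [hb])]
      by_cases hm : PySem.Str.lower (PySem.Str.strip l) = target
      · rw [if_pos hm]
        have ht : pvTailFromHeadingB target (cur ++ [l]) = some [l] := by
          rw [pvTail_append_none target cur l hc, if_pos hm]
        rw [pvSearch_found target rest (cur ++ [l]) [l] ht]
        simp
      · rw [if_neg hm]
        refine ih (cur ++ [l]) ?_
        rw [pvTail_append_none target cur l hc, if_neg hm]

-- A's index-based find + collect equals the linear scan pvGo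
theorem pvA_eq_go (target : String) (full : List String) :
    ∀ (ls : List String) (n : Nat), full.drop n = ls →
    (match pvFindStartA target ls (n : Int) with
     | none => ""
     | some k =>
        PySem.Str.join "\n" (pvCollectA target (full.drop (k + 1).toNat)
          [PySem.List.pyGetD full k ""])) = pvGo target ls := by
  intro ls
  induction ls with
  | nil => intro n _; simp [pvFindStartA, pvGo]
  | cons l rest ih =>
    intro n hd
    have hn : n < full.length := by
      by_contra h
      rw [List.drop_eq_nil_of_le (by omega)] at hd
      exact (List.cons_ne_nil l rest) hd.symm
    have hget : full[n]? = some l := by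
      rw [← List.head?_drop, hd]; rfl
    have hdrop : full.drop (n + 1) = rest := by
      have h1 : List.drop 1 (List.drop n full) = List.drop (n + 1) full := by
        rw [List.drop_drop]
      rw [← h1, hd]
      rfl
    simp only [pvFindStartA, pvGo]
    by_cases hm : PySem.Str.lower (PySem.Str.strip l) = target
    · rw [if_pos hm, if_pos hm]
      have h1 : ((n : Int) + 1).toNat = n + 1 := by omega
      have h2 : PySem.List.pyGetD full (n : Int) "" = l := by
        rw [PySem.List.pyGetD_natCast]
        simp [List.getD, hget]
      simp only [h1, h2, hdrop]
      rw [pvCollectA_eq_takeWhile]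
      rfl
    · rw [if_neg hm, if_neg hm]
      have := ih (n + 1) (by rw [hdrop])
      rw [show ((n : Int) + 1) = ((n + 1 : Nat) : Int) by push_cast; ring]
      exact this

-- ===== VERDICT (by name: the statement is the Claim_ definition above) =====
theorem extract_license_report_py_spec : Claim_equal_extract_license_report_py := by
  intro text heading _
  unfold Spec_extract_license_report_py
  simp only [extract_license_report_py, extract_license_report_py_alt]
  set lines := PySem.Str.splitlines text with hlines
  set target := PySem.Str.lower heading with htarget
  rw [pvFoldl_eq_mkBlocks target lines [] []]
  rw [List.nil_append]
  rw [pvSearch_none target lines [] (by rfl)]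
  have := pvA_eq_go target lines lines 0 (by simp)
  simpa using this
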